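-- pv_equiv track=rewrite | github.com/kafmws/VLM-formula-recognition-dataset | newgenerator/data_generator.py | braces_balanced
-- ===== SOURCE A (Python) =====
-- def braces_balanced(text: str) -> bool:
--     bal = 0
--     i = 0
--     while i < len(text):
--         ch = text[i]
--         if ch == "\\" and i + 1 < len(text) and text[i + 1] in "{}":
--             i += 2
--             continue
--         if ch == "{":
--             bal += 1
--         elif ch == "}":
--             bal -= 1
--             if bal < 0:
--                 return False
--         i += 1
--     return bal == 0
-- ===== SOURCE B (Python) =====
-- def braces_balanced(text: str) -> bool:
--     # Split on backslashes: a brace at the start of a later piece was escaped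
--     # by the separating backslash, so it is skipped; count the rest.
--     bal = 0
--     for j, part in enumerate(text.split("\\")):
--         if j > 0 and part.startswith(("{", "}")):
--             part = part[1:]
--         for ch in part:
--             if ch == "{":
--                 bal += 1
--             elif ch == "}":
--                 bal -= 1
--                 if bal < 0:
--                     return False
--     return bal == 0
-- ===== Notes on version B (the rewrite author's own statement) =====
-- stated objective: simpler
-- what changed: Replaced A's single interleaved index walk (escape-skip via i+=2 mixed with the balance count) by a split-on-backslash decomposition: str.split yields the backslash-separated pieces, a brace at the head of any later piece was escaped by the separating backslash and is skipped, and a plain balance count runs over the rest.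
import Mathlib
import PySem

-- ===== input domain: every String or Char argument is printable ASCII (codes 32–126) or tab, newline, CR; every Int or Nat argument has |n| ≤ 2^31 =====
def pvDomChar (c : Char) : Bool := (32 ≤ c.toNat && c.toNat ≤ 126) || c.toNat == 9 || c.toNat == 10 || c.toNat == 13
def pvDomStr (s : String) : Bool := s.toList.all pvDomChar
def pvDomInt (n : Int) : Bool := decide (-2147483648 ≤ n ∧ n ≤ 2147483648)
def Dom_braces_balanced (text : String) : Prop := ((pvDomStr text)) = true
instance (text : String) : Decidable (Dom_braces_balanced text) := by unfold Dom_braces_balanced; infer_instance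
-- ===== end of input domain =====

-- B replaces A's interleaved escape-skipping index walk by a split-on-backslash
-- decomposition (skip a brace at the head of each later piece, count the rest);
-- objective: simpler.

-- ===== PORT A =====
-- A's while loop with index i and lookahead text[i+1], as structural recursion on the char list
def bracesGoA : List Char → Int → Bool
  | [], bal => bal == 0
  | [c], bal =>
      -- i = len-1: the escape branch cannot fire (i + 1 < len fails)
      if c == '{' then bal + 1 == 0
      else if c == '}' then (if bal - 1 < 0 then false else bal - 1 == 0)
      else bal == 0
  | c :: d :: cs, bal =>
      if c == '\\' && (d == '{' || d == '}') then bracesGoA cs bal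
      else if c == '{' then bracesGoA (d :: cs) (bal + 1)
      else if c == '}' then (if bal - 1 < 0 then false else bracesGoA (d :: cs) (bal - 1))
      else bracesGoA (d :: cs) bal

def braces_balanced (text : String) : Bool := bracesGoA text.toList 0

-- ===== PORT B =====
-- Source B's inner 'for ch in part' loop; none = the early 'return False'
def bpCount : List Char → Int → Option Int
  | [], bal => some bal
  | ch :: cs, bal =>
      if ch == '{' then bpCount cs (bal + 1)
      else if ch == '}' then (if bal - 1 < 0 then none else bpCount cs (bal - 1))
      else bpCount cs bal

-- Source B's outer 'for j, part in enumerate(text.split("\\"))' loop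
def bpParts : List (Int × List Char) → Int → Bool
  | [], bal => bal == 0
  | (j, part) :: ps, bal =>
      let part' := if decide (j > 0) &&
          (PySem.Chars.startswith part ['{'] || PySem.Chars.startswith part ['}'])
        then part.drop 1 else part
      match bpCount part' bal with
      | none => false
      | some b => bpParts ps b

def braces_balanced_alt (text : String) : Bool :=
  bpParts (PySem.List.enumerate (PySem.Chars.splitOn text.toList ['\\'])) 0

-- ===== PRECONDITION & SPEC =====
def Spec_braces_balanced (text : String) (out : Bool) : Prop := out = braces_balanced_alt text
instance (text : String) (out : Bool) : Decidable (Spec_braces_balanced text out) := by unfold Spec_braces_balanced; infer_instance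

-- ===== CLAIM (what is proved, stated in full; the proofs are below) =====
def Claim_equal_braces_balanced : Prop := ∀ (text : String), Dom_braces_balanced text → Spec_braces_balanced text (braces_balanced text)

-- ===== LEMMAS AND PROOFS =====

-- proof-side structural description of splitting on a single backslash
def spBS : List Char → List (List Char)
  | [] => [[]]
  | c :: cs => if c = '\\' then [] :: spBS cs else (spBS cs).modifyHead (c :: ·)

theorem spBS_ne_nil (cs : List Char) : spBS cs ≠ [] := by
  induction cs with
  | nil => simp [spBS]
  | cons c cs ih =>
    simp only [spBS]
    split_ifs
    · simp
    · rcases List.exists_cons_of_ne_nil ih with ⟨h, t, hsp⟩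
      simp [hsp, List.modifyHead]

theorem splitOn_go_eq (l : List Char) :
    ∀ (fuel : Nat) (cur : List Char) (acc : List (List Char)), l.length < fuel →
      PySem.Chars.splitOn.go ['\\'] fuel l cur acc
        = acc.reverse ++ (spBS l).modifyHead (cur.reverse ++ ·) := by
  induction l with
  | nil =>
    intro fuel cur acc h
    cases fuel with
    | zero => omega
    | succ f => simp [PySem.Chars.splitOn.go, spBS, List.modifyHead]
  | cons c cs ih =>
    intro fuel cur acc h
    cases fuel with
    | zero => simp at h
    | succ f =>
      by_cases hc : c = '\\'
      · subst hc
        have hpre : (['\\'] : List Char).isPrefixOf ('\\' :: cs) = true := by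
          simp [List.isPrefixOf]
        rw [show PySem.Chars.splitOn.go ['\\'] (f+1) ('\\' :: cs) cur acc
              = PySem.Chars.splitOn.go ['\\'] f cs [] (cur.reverse :: acc) from by
            simp [PySem.Chars.splitOn.go, hpre]]
        rw [ih f [] (cur.reverse :: acc) (by simpa using h)]
        rcases List.exists_cons_of_ne_nil (spBS_ne_nil cs) with ⟨h0, t0, hsp⟩
        simp [spBS, hsp, List.modifyHead]
      · have hpre : (['\\'] : List Char).isPrefixOf (c :: cs) = false := by
          simp [List.isPrefixOf]
          exact fun hh => hc hh.symm
        rw [show PySem.Chars.splitOn.go ['\\'] (f+1) (c :: cs) cur acc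
              = PySem.Chars.splitOn.go ['\\'] f cs (c :: cur) acc from by
            simp [PySem.Chars.splitOn.go, hpre]]
        rw [ih f (c :: cur) acc (by simpa using h)]
        rcases List.exists_cons_of_ne_nil (spBS_ne_nil cs) with ⟨h0, t0, hsp⟩
        simp [spBS, hsp, hc, List.modifyHead]

theorem splitOn_eq_spBS (cs : List Char) :
    PySem.Chars.splitOn cs ['\\'] = spBS cs := by
  have h := splitOn_go_eq cs (cs.length + 1) [] [] (by omega)
  rcases List.exists_cons_of_ne_nil (spBS_ne_nil cs) with ⟨h0, t0, hsp⟩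
  unfold PySem.Chars.splitOn
  rw [h, hsp]
  simp [List.modifyHead]

-- proof-side view of bpParts: the head piece (j = 0, never stripped) / later pieces
def procRest : List (List Char) → Int → Bool
  | [], bal => bal == 0
  | p :: ps, bal =>
      match bpCount (if PySem.Chars.startswith p ['{'] || PySem.Chars.startswith p ['}']
          then p.drop 1 else p) bal with
      | none => false
      | some b => procRest ps b

def procAll : List (List Char) → Int → Bool
  | [], bal => bal == 0
  | p :: ps, bal =>
      match bpCount p bal with
      | none => false
      | some b => procRest ps b

theorem bpParts_enumerate_pos (ps : List (List Char)) :
    ∀ (s : Int) (bal : Int), 0 < s →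
      bpParts (PySem.List.enumerate ps s) bal = procRest ps bal := by
  induction ps with
  | nil => intro s bal hs; simp [PySem.List.enumerate_nil, bpParts, procRest]
  | cons p ps ih =>
    intro s bal hs
    rw [PySem.List.enumerate_cons]
    have hsd : decide (s > 0) = true := by simpa using hs
    simp only [bpParts, procRest, hsd, Bool.true_and]
    cases hcnt : bpCount (if PySem.Chars.startswith p ['{'] || PySem.Chars.startswith p ['}']
        then p.drop 1 else p) bal with
    | none => rfl
    | some b => exact ih (s + 1) b (by omega)

theorem bpParts_eq_procAll (ps : List (List Char)) (hps : ps ≠ []) (bal : Int) :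
    bpParts (PySem.List.enumerate ps 0) bal = procAll ps bal := by
  rcases List.exists_cons_of_ne_nil hps with ⟨p, t, rfl⟩
  rw [PySem.List.enumerate_cons]
  cases hcnt : bpCount p bal with
  | none => simp [bpParts, procAll, hcnt]
  | some b =>
    simp only [bpParts, procAll, hcnt]
    simp only [show decide ((0:Int) > 0) = false from by simp, Bool.false_and,
      Bool.false_eq_true, if_false, hcnt]
    simpa using bpParts_enumerate_pos t 1 b one_pos

theorem startswith_cons (c : Char) (p : List Char) (b : Char) :
    PySem.Chars.startswith (c :: p) [b] = (b == c) := by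
  simp [PySem.Chars.startswith, List.isPrefixOf]

theorem startswith_nil (b : Char) :
    PySem.Chars.startswith [] [b] = false := by
  simp [PySem.Chars.startswith, List.isPrefixOf]

-- the head of spBS (d :: cs) never begins deeper than d: it is [] or d :: _
theorem spBS_cons_eq (d : Char) (cs : List Char) :
    (d = '\\' ∧ spBS (d :: cs) = [] :: spBS cs) ∨
    (d ≠ '\\' ∧ ∃ h t, spBS cs = h :: t ∧ spBS (d :: cs) = (d :: h) :: t) := by
  by_cases hd : d = '\\'
  · exact Or.inl ⟨hd, by simp [spBS, hd]⟩
  · rcases List.exists_cons_of_ne_nil (spBS_ne_nil cs) with ⟨h, t, hsp⟩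
    exact Or.inr ⟨hd, h, t, hsp, by simp [spBS, hd, hsp, List.modifyHead]⟩

-- the main correspondence: A's interleaved walk = B's split-then-count
theorem bracesGoA_eq_procAll (l : List Char) (bal : Int) :
    bracesGoA l bal = procAll (spBS l) bal := by
  fun_induction bracesGoA l bal with
  | case1 bal =>
    simp [spBS, procAll, procRest, bpCount]
  | case2 c bal h1 =>
    have hc : c = '{' := by simpa using h1
    subst hc
    simp [spBS, procAll, procRest, bpCount, show ('{' : Char) ≠ '\\' from by decide]
  | case3 c bal h1 h2 h3 =>
    have hc : c = '}' := by simpa using h2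
    subst hc
    simp [spBS, procAll, bpCount, h3, show ('}' : Char) ≠ '\\' from by decide]
  | case4 c bal h1 h2 h3 =>
    have hc : c = '}' := by simpa using h2
    subst hc
    simp [spBS, procAll, procRest, bpCount, h3, show ('}' : Char) ≠ '\\' from by decide]
  | case5 c bal h1 h2 =>
    by_cases hc : c = '\\'
    · subst hc
      simp [spBS, procAll, procRest, bpCount, startswith_nil]
    · simp [spBS, procAll, procRest, bpCount, hc, h1, h2]
  | case6 c d cs bal h1 ih =>
    obtain ⟨hc, hd⟩ : c = '\\' ∧ (d = '{' ∨ d = '}') := by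
      simpa using h1
    subst hc
    have hdne : d ≠ '\\' := by rcases hd with h | h <;> subst h <;> decide
    rcases spBS_cons_eq '\\' (d :: cs) with ⟨_, e⟩ | ⟨hne, _⟩
    · rcases spBS_cons_eq d cs with ⟨hd', _⟩ | ⟨_, h, t, hsp, hsp2⟩
      · exact absurd hd' hdne
      · have hstart : (PySem.Chars.startswith (d :: h) ['{']
            || PySem.Chars.startswith (d :: h) ['}']) = true := by
          rcases hd with hdd | hdd <;> subst hdd <;> simp [startswith_cons]
        rw [ih, e, hsp2, hsp]
        simp [procAll, procRest, bpCount, hstart]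
    · exact absurd rfl hne
  | case7 c d cs bal h1 h2 ih =>
    have hc : c = '{' := by simpa using h2
    subst hc
    rcases spBS_cons_eq '{' (d :: cs) with ⟨habs, _⟩ | ⟨_, h, t, hsp, e⟩
    · exact absurd habs (by decide)
    · rw [ih, e, hsp]
      simp [procAll, bpCount]
  | case8 c d cs bal h1 h2 h3 h4 =>
    have hc : c = '}' := by simpa using h3
    subst hc
    rcases spBS_cons_eq '}' (d :: cs) with ⟨habs, _⟩ | ⟨_, h, t, hsp, e⟩
    · exact absurd habs (by decide)
    · rw [e]
      simp [procAll, bpCount, h4]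
  | case9 c d cs bal h1 h2 h3 h4 ih =>
    have hc : c = '}' := by simpa using h3
    subst hc
    rcases spBS_cons_eq '}' (d :: cs) with ⟨habs, _⟩ | ⟨_, h, t, hsp, e⟩
    · exact absurd habs (by decide)
    · rw [ih, e, hsp]
      simp [procAll, bpCount, h4]
  | case10 c d cs bal h1 h2 h3 ih =>
    have hcb : c ≠ '{' ∧ c ≠ '}' := ⟨by simpa using h2, by simpa using h3⟩
    by_cases hc : c = '\\'
    · subst hc
      have hdnb : d ≠ '{' ∧ d ≠ '}' := by
        constructor <;> intro hdd <;> subst hdd <;> simp at h1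
      rcases spBS_cons_eq '\\' (d :: cs) with ⟨_, e⟩ | ⟨hne, _⟩
      · rcases spBS_cons_eq d cs with ⟨hd', hsp2⟩ | ⟨hd', h, t, hsp, hsp2⟩
        · rw [ih, e, hsp2]
          simp [procAll, procRest, bpCount, startswith_nil]
        · have s1 : (('{' : Char) == d) = false := by
            simpa using (Ne.symm hdnb.1)
          have s2 : (('}' : Char) == d) = false := by
            simpa using (Ne.symm hdnb.2)
          have s3 : (d == '{') = false := by simpa using hdnb.1
          have s4 : (d == '}') = false := by simpa using hdnb.2
          rw [ih, e, hsp2]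
          simp [procAll, procRest, bpCount, startswith_cons, s1, s2, s3, s4]
      · exact absurd rfl hne
    · rcases spBS_cons_eq c (d :: cs) with ⟨habs, _⟩ | ⟨_, h, t, hsp, e⟩
      · exact absurd habs hc
      · have e1 : (c == '{') = false := by simpa using hcb.1
        have e2 : (c == '}') = false := by simpa using hcb.2
        rw [ih, e, hsp]
        simp [procAll, bpCount, e1, e2]

-- ===== VERDICT (by name: the statement is the Claim_ definition above) =====
theorem braces_balanced_spec : Claim_equal_braces_balanced := by
  intro text _
  unfold Spec_braces_balanced braces_balanced braces_balanced_alt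
  rw [splitOn_eq_spBS, bpParts_eq_procAll _ (spBS_ne_nil _), bracesGoA_eq_procAll]
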